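-- pv_equiv track=rewrite | github.com/chromeos/adhd | devtools/convert_verb_table.py | match_and_replace
-- ===== SOURCE A (Python) =====
-- def decompose_verb(verb_command):
--     """
--     Verb commands in 12-bit format are formatted as the following:
--
--         |---------------|---------|---------|---------|
--         | Codec Address | Node ID | Verb ID | Payload |
--         |---------------|---------|---------|---------|
--         |     4 bits    | 8 bits  | 12 bits | 8 bits  |
--
--     specified in HD-Audio specification.
--
--     decompose_verb mask out each part of the verb.
--     """
--     codec = verb_command >> 28
--     pin = (verb_command & 0xFF00000) >> 20
--     verb = (verb_command & 0xFFF00) >> 8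
--     val = verb_command & 0xFF
--     return codec, pin, verb, val
--
-- def match_and_replace(verbs):
--     """Try to replace verbs groups with azalia functions.
--
--     Args:
--         verbs: list of 4 verb commands in str.
--
--     Returns:
--         A list consist of either azalia functions or 4 verbs.
--     """
--     if len(verbs) != 4:
--         return verbs
--
--     # The macros are defined in coreboot: src/include/device/azalia_device.h.
--     # Verb IDs are predefined in those macros.
--     pin_cfg = [0x71C, 0x71D, 0x71E, 0x71F]
--     reset = [0x7FF, 0x7FF, 0x7FF, 0x7FF]
--     subvendor = [0x720, 0x721, 0x722, 0x723]
--
--     # Make sure the order of macros and outputs match respectively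
--     macros = [pin_cfg, reset, subvendor]
--     outputs = [
--         "AZALIA_PIN_CFG({common_codec}, 0x{common_pin:02x}, 0x{combined_val:02x}),",
--         "AZALIA_RESET(0x{common_pin:02x}),",
--         "AZALIA_SUBVENDOR({common_codec}, 0x{combined_val:02x}),",
--     ]
--
--     common_codec, common_pin, verb, val = decompose_verb(int(verbs[0], 16))
--
--     for macro, output in zip(macros, outputs):
--         combined_val = 0
--         shift = 0
--         for match_verb, verb_command in zip(macro, verbs):
--             codec, pin, verb, val = decompose_verb(int(verb_command, 16))
--             if codec != common_codec or pin != common_pin or verb != match_verb: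
--                 break
--             combined_val = combined_val | (val << shift)
--             shift += 8
--         else:
--             return [
--                 output.format(
--                     combined_val=combined_val, common_pin=common_pin, common_codec=common_codec
--                 )
--             ]
--
--     return verbs
-- ===== SOURCE B (Python) =====
-- def match_and_replace(verbs):
--     """Try to replace verbs groups with azalia functions.
--
--     Decompose-once rewrite: build the full (codec, pin, verb, val) table up
--     front, check codec/pin commonality once, then compare the verb-id sequence
--     against each macro pattern.  Where the original raises ValueError on an
--     unparsable verb string, this version simply returns the verbs unchanged.
--     """
--     if len(verbs) != 4:
--         return verbs
--
--     def decompose_or_none(s):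
--         try:
--             v = int(s, 16)
--         except ValueError:
--             return None
--         return (v >> 28, (v & 0xFF00000) >> 20, (v & 0xFFF00) >> 8, v & 0xFF)
--
--     table = [decompose_or_none(s) for s in verbs]
--     if None in table:
--         return verbs
--
--     codec, pin = table[0][0], table[0][1]
--     if any(t[0] != codec or t[1] != pin for t in table):
--         return verbs
--
--     vids = [t[2] for t in table]
--     combined = 0
--     for i, t in enumerate(table):
--         combined |= t[3] << (8 * i)
--
--     if vids == [0x71C, 0x71D, 0x71E, 0x71F]:
--         return ["AZALIA_PIN_CFG(%d, 0x%02x, 0x%02x)," % (codec, pin, combined)]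
--     if vids == [0x7FF, 0x7FF, 0x7FF, 0x7FF]:
--         return ["AZALIA_RESET(0x%02x)," % pin]
--     if vids == [0x720, 0x721, 0x722, 0x723]:
--         return ["AZALIA_SUBVENDOR(%d, 0x%02x)," % (codec, combined)]
--     return verbs
-- ===== Notes on version B (the rewrite author's own statement) =====
-- stated objective: simpler
-- what changed: B decomposes all four verb strings once into a (codec, pin, verb, val) table, checks codec/pin commonality in one pass, and compares the verb-id sequence against each macro pattern, instead of A's three break/else loops that each re-parse and re-decompose the verb strings.
import Mathlib
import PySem

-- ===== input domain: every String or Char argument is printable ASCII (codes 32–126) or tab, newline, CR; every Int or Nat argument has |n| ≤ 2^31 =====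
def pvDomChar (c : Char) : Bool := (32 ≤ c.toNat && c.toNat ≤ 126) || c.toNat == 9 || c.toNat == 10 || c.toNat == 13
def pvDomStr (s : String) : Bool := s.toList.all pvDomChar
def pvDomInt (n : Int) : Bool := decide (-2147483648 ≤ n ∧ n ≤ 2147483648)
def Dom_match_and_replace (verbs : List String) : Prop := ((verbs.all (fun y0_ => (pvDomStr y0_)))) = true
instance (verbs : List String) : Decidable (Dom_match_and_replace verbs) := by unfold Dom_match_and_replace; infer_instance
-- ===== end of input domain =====

-- B decomposes all four verbs once into a table and compares the verb-id sequence
-- against each macro pattern (simpler single-pass structure); where A raises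
-- ValueError on an unparsable verb string, B returns the verbs unchanged.

-- ===== PORT A =====

-- decompose_verb: mask out codec / pin / verb-id / payload of a verb command
def pyDecompose (v : Int) : Int × Int × Int × Int :=
  (v >>> 28, (PySem.Int.band v 0xFF00000) >>> 20,
   (PySem.Int.band v 0xFFF00) >>> 8, PySem.Int.band v 0xFF)

-- format(n, '02x'): lowercase hex, left-padded with '0' to width 2.
-- Exact for 0 ≤ n, the only values it is applied to (results of `& 0xFF…` masks).
def toHex2 (n : Int) : String :=
  let ds := Nat.toDigits 16 n.toNat
  String.ofList (List.replicate (2 - ds.length) '0' ++ ds)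

-- the three output format strings, as functions of (common_codec, common_pin, combined_val)
def fmtPinCfg (cc cp cv : Int) : String :=
  "AZALIA_PIN_CFG(" ++ PySem.Int.toStr cc ++ ", 0x" ++ toHex2 cp ++ ", 0x" ++ toHex2 cv ++ "),"
def fmtReset (_cc cp _cv : Int) : String :=
  "AZALIA_RESET(0x" ++ toHex2 cp ++ "),"
def fmtSubvendor (cc _cp cv : Int) : String :=
  "AZALIA_SUBVENDOR(" ++ PySem.Int.toStr cc ++ ", 0x" ++ toHex2 cv ++ "),"

-- the inner `for … zip(macro, verbs) … else` loop: some combined_val on normal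
-- completion (for-else), none on break.  An unparsable verb string raises
-- ValueError in Python (excluded by Pre_); the port returns none there.
def tryMacro : List Int → List String → Int → Int → Int → Nat → Option Int
  | [], _, _, _, cv, _ => some cv
  | _ :: _, [], _, _, cv, _ => some cv
  | m :: ms, s :: ss, cc, cp, cv, sh =>
    match PySem.Int.ofStrBase? s 16 with
    | none => none
    | some v =>
      let d := pyDecompose v
      if d.1 ≠ cc ∨ d.2.1 ≠ cp ∨ d.2.2.1 ≠ m then none
      else tryMacro ms ss cc cp (PySem.Int.bor cv (d.2.2.2 <<< sh)) (sh + 8)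

-- the outer `for macro, output in zip(macros, outputs)` loop
def outerLoop : List (List Int × (Int → Int → Int → String)) → List String → Int → Int → List String
  | [], verbs, _, _ => verbs
  | (mac, output) :: rest, verbs, cc, cp =>
    match tryMacro mac verbs cc cp 0 0 with
    | some cv => [output cc cp cv]
    | none => outerLoop rest verbs cc cp

def match_and_replace (verbs : List String) : List String :=
  if verbs.length ≠ 4 then verbs
  else
    match PySem.Int.ofStrBase? (verbs.getD 0 "") 16 with
    | none => verbs   -- Python raises ValueError here (excluded by Pre_)
    | some v0 =>
      let cc := (pyDecompose v0).1
      let cp := (pyDecompose v0).2.1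
      outerLoop [([0x71C, 0x71D, 0x71E, 0x71F], fmtPinCfg),
                 ([0x7FF, 0x7FF, 0x7FF, 0x7FF], fmtReset),
                 ([0x720, 0x721, 0x722, 0x723], fmtSubvendor)] verbs cc cp

-- ===== PORT B =====

-- decompose_or_none: int(s, 16) with the ValueError turned into None
def decOf (s : String) : Option (Int × Int × Int × Int) :=
  (PySem.Int.ofStrBase? s 16).map pyDecompose

def match_and_replace_alt (verbs : List String) : List String :=
  if verbs.length ≠ 4 then verbs
  else
    let table := verbs.map decOf
    if table.contains none then verbs
    else
      -- table holds no none below this point; .getD (0,0,0,0) only discharges the Option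
      let codec := ((table.getD 0 none).getD (0, 0, 0, 0)).1
      let pin := ((table.getD 0 none).getD (0, 0, 0, 0)).2.1
      if table.any (fun t => (t.getD (0, 0, 0, 0)).1 ≠ codec ∨ (t.getD (0, 0, 0, 0)).2.1 ≠ pin) then verbs
      else
        let vids := table.map (fun t => (t.getD (0, 0, 0, 0)).2.2.1)
        let combined := (PySem.List.enumerate table).foldl
          (fun acc p => PySem.Int.bor acc (((p.2.getD (0, 0, 0, 0)).2.2.2) <<< (8 * p.1).toNat)) 0
        if vids = [0x71C, 0x71D, 0x71E, 0x71F] then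
          ["AZALIA_PIN_CFG(" ++ PySem.Int.toStr codec ++ ", 0x" ++ toHex2 pin ++ ", 0x" ++ toHex2 combined ++ "),"]
        else if vids = [0x7FF, 0x7FF, 0x7FF, 0x7FF] then
          ["AZALIA_RESET(0x" ++ toHex2 pin ++ "),"]
        else if vids = [0x720, 0x721, 0x722, 0x723] then
          ["AZALIA_SUBVENDOR(" ++ PySem.Int.toStr codec ++ ", 0x" ++ toHex2 combined ++ "),"]
        else verbs

-- ===== PRECONDITION & SPEC =====

-- mismatch of one (expected verb-id, verb string) pair against the common codec/pin
def pvMismatch (cc cp : Int) (p : Int × String) : Bool :=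
  match decOf p.2 with
  | none => true
  | some d => !(d.1 == cc && d.2.1 == cp && d.2.2.1 == p.1)

-- macro already broken (strictly) before index j
def pvBlocked (cc cp : Int) (mac : List Int) (verbs : List String) (j : Nat) : Bool :=
  (mac.zip (verbs.take j)).any (pvMismatch cc cp)

-- A returns normally iff: verbs[0] parses as hex, and every unparsable later
-- verbs[j] is unreachable (each macro already mismatches before j)
def pvPreCheck (verbs : List String) : Bool :=
  match decOf (verbs.getD 0 "") with
  | none => false
  | some d =>
    [1, 2, 3].all fun j =>
      (decOf (verbs.getD j "")).isSome ||
        ([[0x71C, 0x71D, 0x71E, 0x71F], [0x7FF, 0x7FF, 0x7FF, 0x7FF],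
          [0x720, 0x721, 0x722, 0x723]].all fun m => pvBlocked d.1 d.2.1 m verbs j)

-- Pre_ excludes exactly the inputs on which Python A raises ValueError from int(s, 16)
def Pre_match_and_replace (verbs : List String) : Prop :=
  verbs.length = 4 → pvPreCheck verbs = true
instance (verbs : List String) : Decidable (Pre_match_and_replace verbs) := by
  unfold Pre_match_and_replace; infer_instance

def pvWitness_match_and_replace : List String := ["11271c10", "11271d20", "11271e30", "11271f40"]

def Spec_match_and_replace (verbs : List String) (out : List String) : Prop :=
  out = match_and_replace_alt verbs
instance (verbs : List String) (out : List String) : Decidable (Spec_match_and_replace verbs out) := by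
  unfold Spec_match_and_replace; infer_instance

-- ===== CLAIM (what is proved, stated in full; the proofs are below) =====
def Claim_equal_match_and_replace : Prop := ∀ (verbs : List String), Dom_match_and_replace verbs → Pre_match_and_replace verbs → Spec_match_and_replace verbs (match_and_replace verbs)
-- ===== LEMMAS AND PROOFS =====


lemma tryMacro_none : ∀ (mac : List Int) (vs : List String) (cc cp cv : Int) (sh : Nat),
    (mac.zip vs).any (pvMismatch cc cp) = true → tryMacro mac vs cc cp cv sh = none := by
  intro mac
  induction mac with
  | nil => simp
  | cons m ms ih =>
    intro vs cc cp cv sh h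
    cases vs with
    | nil => simp at h
    | cons s ss =>
      simp only [List.zip_cons_cons, List.any_cons, Bool.or_eq_true] at h
      unfold tryMacro
      cases hd : PySem.Int.ofStrBase? s 16 with
      | none => rfl
      | some v =>
        simp only []
        by_cases hc : (pyDecompose v).1 ≠ cc ∨ (pyDecompose v).2.1 ≠ cp ∨ (pyDecompose v).2.2.1 ≠ m
        · simp [hc]
        · simp only [hc, if_false]
          apply ih
          rcases h with h | h
          · exfalso
            simp [pvMismatch, decOf, hd] at h
            push_neg at hc
            simp [hc.1, hc.2.1, hc.2.2] at h
          · exact h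

set_option maxHeartbeats 2000000 in
theorem main_equiv : ∀ (verbs : List String), Pre_match_and_replace verbs →
    match_and_replace verbs = match_and_replace_alt verbs := by
  intro verbs hpre
  by_cases hlen : verbs.length = 4
  case neg =>
    unfold match_and_replace match_and_replace_alt
    simp [hlen]
  case pos =>
  match verbs, hlen with
  | [a, b, c, d], _ =>
  have hp : pvPreCheck [a, b, c, d] = true := hpre rfl
  cases ha : PySem.Int.ofStrBase? a 16 with
  | none =>
    exfalso
    simp [pvPreCheck, decOf, ha] at hp
  | some va =>
  cases hb : PySem.Int.ofStrBase? b 16 with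
  | none =>
    simp [pvPreCheck, decOf, ha, hb, pvBlocked] at hp
    obtain ⟨⟨h1m, h2m, h3m⟩, -⟩ := hp
    have t1 : tryMacro [0x71C, 0x71D, 0x71E, 0x71F] [a, b, c, d] (pyDecompose va).1 (pyDecompose va).2.1 0 0 = none :=
      tryMacro_none _ _ _ _ _ _ (by simp [h1m])
    have t2 : tryMacro [0x7FF, 0x7FF, 0x7FF, 0x7FF] [a, b, c, d] (pyDecompose va).1 (pyDecompose va).2.1 0 0 = none :=
      tryMacro_none _ _ _ _ _ _ (by simp [h2m])
    have t3 : tryMacro [0x720, 0x721, 0x722, 0x723] [a, b, c, d] (pyDecompose va).1 (pyDecompose va).2.1 0 0 = none :=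
      tryMacro_none _ _ _ _ _ _ (by simp [h3m])
    simp [match_and_replace, match_and_replace_alt, outerLoop, decOf, ha, hb, t1, t2, t3]
  | some vb =>
  cases hc : PySem.Int.ofStrBase? c 16 with
  | none =>
    simp [pvPreCheck, decOf, ha, hb, hc, pvBlocked] at hp
    obtain ⟨⟨h1m, h2m, h3m⟩, -⟩ := hp
    have t1 : tryMacro [0x71C, 0x71D, 0x71E, 0x71F] [a, b, c, d] (pyDecompose va).1 (pyDecompose va).2.1 0 0 = none :=
      tryMacro_none _ _ _ _ _ _ (by rcases h1m with h | h <;> simp [h])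
    have t2 : tryMacro [0x7FF, 0x7FF, 0x7FF, 0x7FF] [a, b, c, d] (pyDecompose va).1 (pyDecompose va).2.1 0 0 = none :=
      tryMacro_none _ _ _ _ _ _ (by rcases h2m with h | h <;> simp [h])
    have t3 : tryMacro [0x720, 0x721, 0x722, 0x723] [a, b, c, d] (pyDecompose va).1 (pyDecompose va).2.1 0 0 = none :=
      tryMacro_none _ _ _ _ _ _ (by rcases h3m with h | h <;> simp [h])
    simp [match_and_replace, match_and_replace_alt, outerLoop, decOf, ha, hb, hc, t1, t2, t3]
  | some vc =>
  cases hd : PySem.Int.ofStrBase? d 16 with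
  | none =>
    simp [pvPreCheck, decOf, ha, hb, hc, hd, pvBlocked] at hp
    obtain ⟨h1m, h2m, h3m⟩ := hp
    have t1 : tryMacro [0x71C, 0x71D, 0x71E, 0x71F] [a, b, c, d] (pyDecompose va).1 (pyDecompose va).2.1 0 0 = none :=
      tryMacro_none _ _ _ _ _ _ (by rcases h1m with h | h | h <;> simp [h])
    have t2 : tryMacro [0x7FF, 0x7FF, 0x7FF, 0x7FF] [a, b, c, d] (pyDecompose va).1 (pyDecompose va).2.1 0 0 = none :=
      tryMacro_none _ _ _ _ _ _ (by rcases h2m with h | h | h <;> simp [h])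
    have t3 : tryMacro [0x720, 0x721, 0x722, 0x723] [a, b, c, d] (pyDecompose va).1 (pyDecompose va).2.1 0 0 = none :=
      tryMacro_none _ _ _ _ _ _ (by rcases h3m with h | h | h <;> simp [h])
    simp [match_and_replace, match_and_replace_alt, outerLoop, decOf, ha, hb, hc, hd, t1, t2, t3]
  | some vd =>
  clear hp hpre
  have charA : ∀ (m0 m1 m2 m3 cc cp : Int),
      tryMacro [m0, m1, m2, m3] [a, b, c, d] cc cp 0 0 =
        (if ((pyDecompose va).1 = cc ∧ (pyDecompose va).2.1 = cp ∧ (pyDecompose va).2.2.1 = m0)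
            ∧ ((pyDecompose vb).1 = cc ∧ (pyDecompose vb).2.1 = cp ∧ (pyDecompose vb).2.2.1 = m1)
            ∧ ((pyDecompose vc).1 = cc ∧ (pyDecompose vc).2.1 = cp ∧ (pyDecompose vc).2.2.1 = m2)
            ∧ ((pyDecompose vd).1 = cc ∧ (pyDecompose vd).2.1 = cp ∧ (pyDecompose vd).2.2.1 = m3)
          then some (PySem.Int.bor (PySem.Int.bor (PySem.Int.bor (PySem.Int.bor 0 ((pyDecompose va).2.2.2 <<< (0 : Nat))) ((pyDecompose vb).2.2.2 <<< (8 : Nat))) ((pyDecompose vc).2.2.2 <<< (16 : Nat))) ((pyDecompose vd).2.2.2 <<< (24 : Nat)))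
          else none) := by
    intro m0 m1 m2 m3 cc cp
    simp only [tryMacro, ha, hb, hc, hd]
    norm_num
    split_ifs <;> first | rfl | (push_neg at *; tauto)
  have hAeq : match_and_replace [a, b, c, d]
      = outerLoop [([0x71C, 0x71D, 0x71E, 0x71F], fmtPinCfg),
                   ([0x7FF, 0x7FF, 0x7FF, 0x7FF], fmtReset),
                   ([0x720, 0x721, 0x722, 0x723], fmtSubvendor)] [a, b, c, d]
          (pyDecompose va).1 (pyDecompose va).2.1 := by
    simp [match_and_replace, ha]
  rw [hAeq]
  simp only [outerLoop, charA, eq_self_iff_true, true_and, and_true]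
  by_cases h1 : ((pyDecompose va).2.2.1 = (1820 : Int)
      ∧ ((pyDecompose vb).1 = (pyDecompose va).1 ∧ (pyDecompose vb).2.1 = (pyDecompose va).2.1 ∧ (pyDecompose vb).2.2.1 = 1821)
      ∧ ((pyDecompose vc).1 = (pyDecompose va).1 ∧ (pyDecompose vc).2.1 = (pyDecompose va).2.1 ∧ (pyDecompose vc).2.2.1 = 1822)
      ∧ ((pyDecompose vd).1 = (pyDecompose va).1 ∧ (pyDecompose vd).2.1 = (pyDecompose va).2.1 ∧ (pyDecompose vd).2.2.1 = 1823))
  · obtain ⟨q0, ⟨e1, f1, q1⟩, ⟨e2, f2, q2⟩, ⟨e3, f3, q3⟩⟩ := h1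
    simp [match_and_replace_alt, decOf, ha, hb, hc, hd,
          q0, e1, f1, q1, e2, f2, q2, e3, f3, q3, fmtPinCfg, PySem.List.enumerate]
  rw [if_neg h1]
  by_cases h2 : ((pyDecompose va).2.2.1 = (2047 : Int)
      ∧ ((pyDecompose vb).1 = (pyDecompose va).1 ∧ (pyDecompose vb).2.1 = (pyDecompose va).2.1 ∧ (pyDecompose vb).2.2.1 = 2047)
      ∧ ((pyDecompose vc).1 = (pyDecompose va).1 ∧ (pyDecompose vc).2.1 = (pyDecompose va).2.1 ∧ (pyDecompose vc).2.2.1 = 2047)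
      ∧ ((pyDecompose vd).1 = (pyDecompose va).1 ∧ (pyDecompose vd).2.1 = (pyDecompose va).2.1 ∧ (pyDecompose vd).2.2.1 = 2047))
  · obtain ⟨q0, ⟨e1, f1, q1⟩, ⟨e2, f2, q2⟩, ⟨e3, f3, q3⟩⟩ := h2
    simp [match_and_replace_alt, decOf, ha, hb, hc, hd,
          q0, e1, f1, q1, e2, f2, q2, e3, f3, q3, fmtReset, PySem.List.enumerate]
  rw [if_neg h2]
  by_cases h3 : ((pyDecompose va).2.2.1 = (1824 : Int)
      ∧ ((pyDecompose vb).1 = (pyDecompose va).1 ∧ (pyDecompose vb).2.1 = (pyDecompose va).2.1 ∧ (pyDecompose vb).2.2.1 = 1825)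
      ∧ ((pyDecompose vc).1 = (pyDecompose va).1 ∧ (pyDecompose vc).2.1 = (pyDecompose va).2.1 ∧ (pyDecompose vc).2.2.1 = 1826)
      ∧ ((pyDecompose vd).1 = (pyDecompose va).1 ∧ (pyDecompose vd).2.1 = (pyDecompose va).2.1 ∧ (pyDecompose vd).2.2.1 = 1827))
  · obtain ⟨q0, ⟨e1, f1, q1⟩, ⟨e2, f2, q2⟩, ⟨e3, f3, q3⟩⟩ := h3
    simp [match_and_replace_alt, decOf, ha, hb, hc, hd,
          q0, e1, f1, q1, e2, f2, q2, e3, f3, q3, fmtSubvendor, PySem.List.enumerate]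
  rw [if_neg h3]
  -- no macro matches: both sides return the verbs unchanged
  by_cases hcom : ((pyDecompose vb).1 = (pyDecompose va).1 ∧ (pyDecompose vb).2.1 = (pyDecompose va).2.1)
      ∧ ((pyDecompose vc).1 = (pyDecompose va).1 ∧ (pyDecompose vc).2.1 = (pyDecompose va).2.1)
      ∧ ((pyDecompose vd).1 = (pyDecompose va).1 ∧ (pyDecompose vd).2.1 = (pyDecompose va).2.1)
  · obtain ⟨⟨e1, f1⟩, ⟨e2, f2⟩, ⟨e3, f3⟩⟩ := hcom
    have hv1 : ¬((pyDecompose va).2.2.1 = (1820 : Int) ∧ (pyDecompose vb).2.2.1 = 1821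
        ∧ (pyDecompose vc).2.2.1 = 1822 ∧ (pyDecompose vd).2.2.1 = 1823) :=
      fun ⟨x0, x1, x2, x3⟩ => h1 ⟨x0, ⟨e1, f1, x1⟩, ⟨e2, f2, x2⟩, e3, f3, x3⟩
    have hv2 : ¬((pyDecompose va).2.2.1 = (2047 : Int) ∧ (pyDecompose vb).2.2.1 = 2047
        ∧ (pyDecompose vc).2.2.1 = 2047 ∧ (pyDecompose vd).2.2.1 = 2047) :=
      fun ⟨x0, x1, x2, x3⟩ => h2 ⟨x0, ⟨e1, f1, x1⟩, ⟨e2, f2, x2⟩, e3, f3, x3⟩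
    have hv3 : ¬((pyDecompose va).2.2.1 = (1824 : Int) ∧ (pyDecompose vb).2.2.1 = 1825
        ∧ (pyDecompose vc).2.2.1 = 1826 ∧ (pyDecompose vd).2.2.1 = 1827) :=
      fun ⟨x0, x1, x2, x3⟩ => h3 ⟨x0, ⟨e1, f1, x1⟩, ⟨e2, f2, x2⟩, e3, f3, x3⟩
    simp [match_and_replace_alt, decOf, ha, hb, hc, hd, PySem.List.enumerate]
    intro _ _ _ _ _ _
    simp [hv1, hv2, hv3]
  · simp [match_and_replace_alt, decOf, ha, hb, hc, hd, PySem.List.enumerate]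
    intro e1 f1 e2 f2 e3 f3
    exact absurd ⟨⟨e1, f1⟩, ⟨e2, f2⟩, e3, f3⟩ hcom

-- ===== VERDICT (by name: the statement is the Claim_ definition above) =====
theorem match_and_replace_spec : Claim_equal_match_and_replace := by
  intro verbs _ hpre
  exact main_equiv verbs hpre
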